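-- pv_equiv track=rewrite | github.com/Anouck96/ThesisLandC | eval/mcNemartest.py | ctabnum
-- ===== SOURCE A (Python) =====
-- def ctabnum(model1list , model2list):
-- 	# Gets numbers for contingency table
-- 	c1c2 = c1i2 = i1c2 = i1i2 = 0
-- 	for m1i, m2i in zip(model1list, model2list):
-- 		if m1i == "True" and m2i == "True":
-- 			c1c2 = c1c2 + 1
-- 		elif m1i == "True" and m2i == "False":
-- 			c1i2 = c1i2 + 1
-- 		elif m1i == "False" and m2i == "True":
-- 			i1c2 = i1c2 + 1
-- 		else:
-- 			i1i2 = i1i2 + 1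
-- 	return c1c2, c1i2, i1c2, i1i2
-- ===== SOURCE B (Python) =====
-- def ctabnum(model1list, model2list):
--     # Gets numbers for contingency table
--     pairs = list(zip(model1list, model2list))
--     c1c2 = sum(1 for p in pairs if p == ("True", "True"))
--     c1i2 = sum(1 for p in pairs if p == ("True", "False"))
--     i1c2 = sum(1 for p in pairs if p == ("False", "True"))
--     return c1c2, c1i2, i1c2, len(pairs) - c1c2 - c1i2 - i1c2
-- ===== Notes on version B (the rewrite author's own statement) =====
-- stated objective: alternative
-- what changed: Replaces the single 4-way branching accumulator loop by three independent category counts over the zipped pairs, deriving the catch-all fourth bucket arithmetically as len(pairs) minus the three counts.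
import Mathlib
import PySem

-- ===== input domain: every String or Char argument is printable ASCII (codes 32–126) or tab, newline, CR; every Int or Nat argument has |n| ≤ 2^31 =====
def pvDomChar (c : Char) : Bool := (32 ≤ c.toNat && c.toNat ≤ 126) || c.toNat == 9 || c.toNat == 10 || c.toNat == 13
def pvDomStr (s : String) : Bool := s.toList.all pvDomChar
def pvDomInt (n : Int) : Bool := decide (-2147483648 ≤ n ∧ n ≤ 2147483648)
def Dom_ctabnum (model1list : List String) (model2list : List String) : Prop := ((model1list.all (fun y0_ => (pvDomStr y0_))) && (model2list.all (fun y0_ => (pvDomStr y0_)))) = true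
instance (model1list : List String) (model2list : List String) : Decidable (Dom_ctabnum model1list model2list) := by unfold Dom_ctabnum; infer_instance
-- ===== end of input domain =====

-- -- B counts the three explicit categories separately and derives the fourth bucket by subtraction (alternative decomposition; return value identical).


-- ===== PORT A =====
-- Port of A: one left fold over the zipped lists carrying all four counters;
-- the loop body (the if/elif/elif/else chain) is the named step function.
def ctabnumStep (s : Int × Int × Int × Int) (p : String × String) : Int × Int × Int × Int :=
  if p.1 == "True" && p.2 == "True" then (s.1 + 1, s.2.1, s.2.2.1, s.2.2.2)
  else if p.1 == "True" && p.2 == "False" then (s.1, s.2.1 + 1, s.2.2.1, s.2.2.2)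
  else if p.1 == "False" && p.2 == "True" then (s.1, s.2.1, s.2.2.1 + 1, s.2.2.2)
  else (s.1, s.2.1, s.2.2.1, s.2.2.2 + 1)

def ctabnum (model1list : List String) (model2list : List String) : Int × Int × Int × Int :=
  (model1list.zip model2list).foldl ctabnumStep (0, 0, 0, 0)

-- ===== PORT B =====
-- Port of B: three independent category counts; the fourth bucket is length minus the three.
def ctabnum_alt (model1list : List String) (model2list : List String) : Int × Int × Int × Int :=
  let pairs := model1list.zip model2list
  let c1c2 : Int := pairs.countP (· == ("True", "True"))
  let c1i2 : Int := pairs.countP (· == ("True", "False"))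
  let i1c2 : Int := pairs.countP (· == ("False", "True"))
  (c1c2, c1i2, i1c2, (pairs.length : Int) - c1c2 - c1i2 - i1c2)

-- ===== PRECONDITION & SPEC =====
def Spec_ctabnum (model1list : List String) (model2list : List String) (out : Int × Int × Int × Int) : Prop := out = ctabnum_alt model1list model2list
instance (model1list : List String) (model2list : List String) (out : Int × Int × Int × Int) : Decidable (Spec_ctabnum model1list model2list out) := by unfold Spec_ctabnum; infer_instance

-- ===== CLAIM (what is proved, stated in full; the proofs are below) =====
def Claim_equal_ctabnum : Prop := ∀ (model1list : List String) (model2list : List String), Dom_ctabnum model1list model2list → Spec_ctabnum model1list model2list (ctabnum model1list model2list)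

-- ===== LEMMAS AND PROOFS =====
-- The fold's result from any start: each counter gains its category's count;
-- the catch-all gains length minus the three counted categories.
theorem ctabnum_foldl_eq (l : List (String × String)) (a b c d : Int) :
    l.foldl ctabnumStep (a, b, c, d)
    = (a + l.countP (· == ("True", "True")),
       b + l.countP (· == ("True", "False")),
       c + l.countP (· == ("False", "True")),
       d + ((l.length : Int)
            - l.countP (· == ("True", "True"))
            - l.countP (· == ("True", "False"))
            - l.countP (· == ("False", "True")))) := by
  induction l generalizing a b c d with
  | nil => simp
  | cons p t ih =>
    rcases p with ⟨x, y⟩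
    rw [List.foldl_cons]
    by_cases h1 : x = "True" ∧ y = "True"
    · rw [show ctabnumStep (a, b, c, d) (x, y) = (a + 1, b, c, d) by
        simp [ctabnumStep, h1.1, h1.2], ih]
      simp [h1.1, h1.2, Prod.ext_iff]
      omega
    · by_cases h2 : x = "True" ∧ y = "False"
      · rw [show ctabnumStep (a, b, c, d) (x, y) = (a, b + 1, c, d) by
          simp [ctabnumStep, h2.1, h2.2], ih]
        simp [h2.1, h2.2, Prod.ext_iff]
        omega
      · by_cases h3 : x = "False" ∧ y = "True"
        · rw [show ctabnumStep (a, b, c, d) (x, y) = (a, b, c + 1, d) by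
            simp [ctabnumStep, h3.1, h3.2], ih]
          simp [h3.1, h3.2, Prod.ext_iff]
          omega
        · have e1 : ¬ (x = "True" ∧ y = "True") := h1
          have e2 : ¬ (x = "True" ∧ y = "False") := h2
          have e3 : ¬ (x = "False" ∧ y = "True") := h3
          rw [show ctabnumStep (a, b, c, d) (x, y) = (a, b, c, d + 1) by
            simp [ctabnumStep, e1, e2, e3], ih]
          simp [e1, e2, e3, Prod.ext_iff]
          omega

-- ===== VERDICT (by name: the statement is the Claim_ definition above) =====
theorem ctabnum_spec : Claim_equal_ctabnum := by
  intro m1 m2 _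
  unfold Spec_ctabnum ctabnum ctabnum_alt
  simp only []
  rw [ctabnum_foldl_eq (m1.zip m2) 0 0 0 0]
  simp
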